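-- pv_equiv track=rewrite | github.com/GeunHyeog/solomond-ai-system | slide_timeline_synchronizer.py | _classify_slide_content
-- ===== SOURCE A (Python) =====
-- def _classify_slide_content(text: str) -> str:
--     """슬라이드 내용 분류"""
--     text_lower = text.lower()
--
--     # 키워드 기반 분류
--     if any(word in text_lower for word in ['welcome', 'introduction', 'overview', 'agenda']):
--         return 'introduction'
--     elif any(word in text_lower for word in ['conclusion', 'summary', 'thank you', 'questions']):
--         return 'conclusion'
--     elif any(word in text_lower for word in ['data', 'analysis', 'research', 'results']):
--         return 'content_data'
--     elif any(word in text_lower for word in ['sustainable', 'eco-friendly', 'luxury', 'consumer']):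
--         return 'content_main'
--     else:
--         return 'content_general'
-- ===== SOURCE B (Python) =====
-- _KEYWORD_PRIORITY = {
--     'welcome': 0, 'introduction': 0, 'overview': 0, 'agenda': 0,
--     'conclusion': 1, 'summary': 1, 'thank you': 1, 'questions': 1,
--     'data': 2, 'analysis': 2, 'research': 2, 'results': 2,
--     'sustainable': 3, 'eco-friendly': 3, 'luxury': 3, 'consumer': 3,
-- }
-- _LABELS = ('introduction', 'conclusion', 'content_data', 'content_main', 'content_general')
--
-- def _classify_slide_content(text: str) -> str:
--     """Classify by the highest-priority (lowest rank) keyword present anywhere."""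
--     text_lower = text.lower()
--     best = len(_LABELS) - 1
--     for word, priority in _KEYWORD_PRIORITY.items():
--         if priority < best and word in text_lower:
--             best = priority
--     return _LABELS[best]
-- ===== Notes on version B (the rewrite author's own statement) =====
-- stated objective: alternative
-- what changed: Replaces the ordered if/elif group tests with early return by a single min-reduction: every keyword carries a numeric priority, one pass over a flat keyword->priority map keeps the minimum priority found in the text, and the label is looked up by that index.
import Mathlib
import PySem

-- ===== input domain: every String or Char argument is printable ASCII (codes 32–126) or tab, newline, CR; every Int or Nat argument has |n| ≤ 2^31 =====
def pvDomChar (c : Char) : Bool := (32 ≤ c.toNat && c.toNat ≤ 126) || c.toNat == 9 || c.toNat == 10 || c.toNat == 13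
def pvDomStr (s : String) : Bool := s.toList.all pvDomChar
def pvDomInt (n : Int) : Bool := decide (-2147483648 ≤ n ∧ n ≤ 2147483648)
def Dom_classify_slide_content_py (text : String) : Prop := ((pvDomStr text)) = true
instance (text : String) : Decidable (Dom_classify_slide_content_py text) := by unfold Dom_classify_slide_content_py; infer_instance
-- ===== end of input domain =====

-- B replaces the ordered if/elif keyword-group tests by a min-reduction over a flat
-- keyword→priority map, then indexes the label table by the minimum priority found (alternative).

-- ===== PORT A =====
def classify_slide_content_py (text : String) : String :=
  let text_lower := PySem.Str.lower text
  if (["welcome", "introduction", "overview", "agenda"] : List String).any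
      (fun word => PySem.Str.isIn word text_lower) then "introduction"
  else if (["conclusion", "summary", "thank you", "questions"] : List String).any
      (fun word => PySem.Str.isIn word text_lower) then "conclusion"
  else if (["data", "analysis", "research", "results"] : List String).any
      (fun word => PySem.Str.isIn word text_lower) then "content_data"
  else if (["sustainable", "eco-friendly", "luxury", "consumer"] : List String).any
      (fun word => PySem.Str.isIn word text_lower) then "content_main"
  else "content_general"

-- ===== PORT B =====
def pvKeywordPriority : List (String × Nat) :=
  [("welcome", 0), ("introduction", 0), ("overview", 0), ("agenda", 0),
   ("conclusion", 1), ("summary", 1), ("thank you", 1), ("questions", 1),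
   ("data", 2), ("analysis", 2), ("research", 2), ("results", 2),
   ("sustainable", 3), ("eco-friendly", 3), ("luxury", 3), ("consumer", 3)]

def pvLabels : List String :=
  ["introduction", "conclusion", "content_data", "content_main", "content_general"]

-- the 'for word, priority in …: if priority < best and word in text_lower: best = priority' loop
def pvBestLoop (t : String) (best : Nat) : List (String × Nat) → Nat
  | [] => best
  | (w, p) :: rest =>
      pvBestLoop t (if p < best ∧ PySem.Str.isIn w t then p else best) rest

def classify_slide_content_py_alt (text : String) : String :=
  let text_lower := PySem.Str.lower text
  pvLabels.getD (pvBestLoop text_lower (pvLabels.length - 1) pvKeywordPriority) "content_general"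

-- ===== PRECONDITION & SPEC =====
def Spec_classify_slide_content_py (text : String) (out : String) : Prop := out = classify_slide_content_py_alt text
instance (text : String) (out : String) : Decidable (Spec_classify_slide_content_py text out) := by unfold Spec_classify_slide_content_py; infer_instance

-- ===== CLAIM (what is proved, stated in full; the proofs are below) =====
def Claim_equal_classify_slide_content_py : Prop := ∀ (text : String), Dom_classify_slide_content_py text → Spec_classify_slide_content_py text (classify_slide_content_py text)

-- ===== LEMMAS AND PROOFS =====

-- processing one priority group: the accumulator drops to p iff p < best and some keyword hits
theorem pvBestLoop_group (t : String) (p best : Nat) (ws : List String)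
    (rest : List (String × Nat)) :
    pvBestLoop t best (ws.map (fun w => (w, p)) ++ rest) =
      pvBestLoop t
        (if p < best ∧ ws.any (fun w => PySem.Str.isIn w t) then p else best) rest := by
  induction ws generalizing best with
  | nil => simp
  | cons w ws ih =>
      simp only [List.map_cons, List.cons_append, pvBestLoop, ih, List.any_cons]
      congr 1
      by_cases h1 : p < best
      · by_cases h2 : PySem.Str.isIn w t
        all_goals (simp only [PySem.Str.isIn_eq] at h2 ⊢; simp [h1, h2])
      · simp [h1]

theorem classify_slide_content_py_spec : Claim_equal_classify_slide_content_py := by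
  intro text _
  unfold Spec_classify_slide_content_py classify_slide_content_py classify_slide_content_py_alt
  have htab : pvKeywordPriority =
      (["welcome", "introduction", "overview", "agenda"].map (fun w => (w, 0))) ++
      ((["conclusion", "summary", "thank you", "questions"].map (fun w => (w, 1))) ++
      ((["data", "analysis", "research", "results"].map (fun w => (w, 2))) ++
      ((["sustainable", "eco-friendly", "luxury", "consumer"].map (fun w => (w, 3))) ++ []))) := rfl
  rw [htab]
  simp only [pvBestLoop_group]
  split_ifs <;> simp_all [pvBestLoop, pvLabels]

-- ===== VERDICT (by name: the statement is the Claim_ definition above) =====
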